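-- pv_equiv track=rewrite | github.com/Xilinx/finn | src/finn/compressor/src/add_multi_finn.py | slice_lanes
-- ===== SOURCE A (Python) =====
-- def slice_lanes(version, ww, aw, accu_width, narrow_weights):
--     """
--     Compute DSP lane offsets — Python replica of mvu.sv::sliceLanes().
--     Parameters
--     ----------
--     version : int
--         DSP version (1=DSP48E1, 2=DSP48E2, 3=DSP58).
--     ww : int
--         WEIGHT_WIDTH.
--     aw : int
--         ACTIVATION_WIDTH.
--     accu_width : int
--         ACCU_WIDTH.
--     narrow_weights : bool
--         NARROW_WEIGHTS flag.
--
--     Returns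
--     -------
--     (num_lanes, offsets) : tuple
--         num_lanes : int
--             number of DSP lanes.
--         offsets   : list[int]
--             lane boundary positions (length num_lanes+1).
--     """
--     a_width = 25 + 2 * (version > 1)
--     p_width = 58 if version == 3 else 48
--     min_lane_width = ww + aw - 1
--
--     if a_width == ww:
--         num_lanes = 1
--     else:
--         num_lanes = 1 + (a_width - (0 if narrow_weights else 1) - ww) // min_lane_width
--
--     # Distribute slack bits preferring right lanes
--     bit_slack = a_width - (0 if narrow_weights else 1) - ww - (num_lanes - 1) * min_lane_width
--
--     offsets = [0] * (num_lanes + 1)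
--     for i in range(1, num_lanes):
--         extra = (bit_slack + (num_lanes - 1 - i)) // (num_lanes - i)
--         offsets[i] = offsets[i - 1] + min_lane_width + extra
--         bit_slack -= extra
--
--     # Last lane bounded by min(ACCU_WIDTH, P_WIDTH)
--     offsets[num_lanes] = offsets[num_lanes - 1] + accu_width
--     if offsets[num_lanes] > p_width:
--         offsets[num_lanes] = p_width
--
--     return num_lanes, offsets
-- ===== SOURCE B (Python) =====
-- def slice_lanes(version, ww, aw, accu_width, narrow_weights):
--     a_width = 25 + 2 * (version > 1)
--     p_width = 58 if version == 3 else 48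
--     min_lane_width = ww + aw - 1
--
--     if a_width == ww:
--         num_lanes = 1
--     else:
--         num_lanes = 1 + (a_width - (0 if narrow_weights else 1) - ww) // min_lane_width
--
--     # Closed-form slack distribution: with k = num_lanes - 1 interior gaps, the
--     # first (bit_slack mod k) gaps get one extra bit over the base share
--     # bit_slack // k, so lane starts are i*(min_lane_width+base) + min(i, rem).
--     if num_lanes > 1:
--         k = num_lanes - 1
--         bit_slack = a_width - (0 if narrow_weights else 1) - ww - k * min_lane_width
--         base, rem = divmod(bit_slack, k)
--         offsets = [i * (min_lane_width + base) + min(i, rem) for i in range(num_lanes)]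
--         last_start = offsets[-1]
--     else:
--         offsets = [0] * num_lanes
--         last_start = 0
--     offsets.append(min(last_start + accu_width, p_width))
--     return num_lanes, offsets
-- ===== Notes on version B (the rewrite author's own statement) =====
-- stated objective: alternative
-- what changed: The sequential slack-distribution loop (carrying bit_slack and doing one ceiling division per lane) is replaced by a closed-form per-index formula: base = bit_slack // k, rem = bit_slack % k, and offsets[i] = i*(min_lane_width+base) + min(i, rem) built by a single comprehension.
import Mathlib
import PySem

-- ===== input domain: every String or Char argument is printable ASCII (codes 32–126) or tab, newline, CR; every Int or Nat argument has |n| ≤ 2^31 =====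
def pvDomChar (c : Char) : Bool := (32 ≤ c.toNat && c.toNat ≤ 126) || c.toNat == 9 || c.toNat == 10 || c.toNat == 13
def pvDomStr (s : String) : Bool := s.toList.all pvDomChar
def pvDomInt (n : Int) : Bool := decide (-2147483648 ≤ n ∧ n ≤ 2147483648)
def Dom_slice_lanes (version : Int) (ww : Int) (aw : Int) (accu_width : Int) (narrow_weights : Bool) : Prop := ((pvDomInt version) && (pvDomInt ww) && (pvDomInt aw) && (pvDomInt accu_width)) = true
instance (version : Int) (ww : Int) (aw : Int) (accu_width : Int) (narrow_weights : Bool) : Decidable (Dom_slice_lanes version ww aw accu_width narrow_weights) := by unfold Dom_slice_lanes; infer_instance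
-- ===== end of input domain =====

-- B replaces A's sequential slack loop by a closed-form per-lane offset formula (alternative decomposition, same cost).

-- ===== PORT A =====
-- body of A's `for i in range(1, num_lanes)` loop: state = (offsets, bit_slack)
def laneStep (min_lane_width num_lanes : Int) (st : List Int × Int) (i : Int) : List Int × Int :=
  let extra := PySem.Int.floordiv (st.2 + (num_lanes - 1 - i)) (num_lanes - i)
  (PySem.List.pySetD st.1 i (PySem.List.pyGetD st.1 (i - 1) 0 + min_lane_width + extra),
   st.2 - extra)

def slice_lanes (version : Int) (ww : Int) (aw : Int) (accu_width : Int) (narrow_weights : Bool) : Int × List Int :=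
  let a_width : Int := 25 + 2 * (if version > 1 then 1 else 0)
  let p_width : Int := if version = 3 then 58 else 48
  let min_lane_width : Int := ww + aw - 1
  let d : Int := if narrow_weights then 0 else 1
  let num_lanes : Int :=
    if a_width = ww then 1
    else 1 + PySem.Int.floordiv (a_width - d - ww) min_lane_width
  let bit_slack : Int := a_width - d - ww - (num_lanes - 1) * min_lane_width
  let offsets : List Int := List.replicate (num_lanes + 1).toNat 0
  let st := (PySem.List.pyRange 1 num_lanes 1).foldl (laneStep min_lane_width num_lanes) (offsets, bit_slack)
  let offsets := st.1
  let offsets := PySem.List.pySetD offsets num_lanes (PySem.List.pyGetD offsets (num_lanes - 1) 0 + accu_width)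
  let offsets := if PySem.List.pyGetD offsets num_lanes 0 > p_width
                 then PySem.List.pySetD offsets num_lanes p_width else offsets
  (num_lanes, offsets)

-- ===== PORT B =====
def slice_lanes_alt (version : Int) (ww : Int) (aw : Int) (accu_width : Int) (narrow_weights : Bool) : Int × List Int :=
  let a_width : Int := 25 + 2 * (if version > 1 then 1 else 0)
  let p_width : Int := if version = 3 then 58 else 48
  let min_lane_width : Int := ww + aw - 1
  let d : Int := if narrow_weights then 0 else 1
  let num_lanes : Int :=
    if a_width = ww then 1
    else 1 + PySem.Int.floordiv (a_width - d - ww) min_lane_width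
  if num_lanes > 1 then
    let k := num_lanes - 1
    let bit_slack : Int := a_width - d - ww - k * min_lane_width
    let base := PySem.Int.floordiv bit_slack k
    let rem := PySem.Int.mod bit_slack k
    let offsets := (PySem.List.pyRange 0 num_lanes 1).map (fun i => i * (min_lane_width + base) + min i rem)
    let last_start := PySem.List.pyGetD offsets (-1) 0
    (num_lanes, offsets ++ [min (last_start + accu_width) p_width])
  else
    let offsets : List Int := List.replicate num_lanes.toNat 0
    let last_start : Int := 0
    (num_lanes, offsets ++ [min (last_start + accu_width) p_width])

-- ===== PRECONDITION & SPEC =====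
-- Pre_ excludes exactly the inputs where the Python A raises: min_lane_width = 0 (ZeroDivisionError
-- in the num_lanes formula) and num_lanes ≤ -1 (IndexError on the empty/too-short offsets list).
def Pre_slice_lanes (version : Int) (ww : Int) (aw : Int) (accu_width : Int) (narrow_weights : Bool) : Prop :=
  let a_width : Int := 25 + 2 * (if version > 1 then 1 else 0)
  let min_lane_width : Int := ww + aw - 1
  let d : Int := if narrow_weights then 0 else 1
  a_width = ww ∨ (min_lane_width ≠ 0 ∧ 0 ≤ 1 + PySem.Int.floordiv (a_width - d - ww) min_lane_width)
instance (version : Int) (ww : Int) (aw : Int) (accu_width : Int) (narrow_weights : Bool) : Decidable (Pre_slice_lanes version ww aw accu_width narrow_weights) := by unfold Pre_slice_lanes; infer_instance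

def pvWitness_slice_lanes : Int × Int × Int × Int × Bool := (1, 4, 4, 40, false)

def Spec_slice_lanes (version : Int) (ww : Int) (aw : Int) (accu_width : Int) (narrow_weights : Bool) (out : Int × List Int) : Prop := out = slice_lanes_alt version ww aw accu_width narrow_weights
instance (version : Int) (ww : Int) (aw : Int) (accu_width : Int) (narrow_weights : Bool) (out : Int × List Int) : Decidable (Spec_slice_lanes version ww aw accu_width narrow_weights out) := by unfold Spec_slice_lanes; infer_instance

-- ===== CLAIM (what is proved, stated in full; the proofs are below) =====
def Claim_equal_slice_lanes : Prop := ∀ (version : Int) (ww : Int) (aw : Int) (accu_width : Int) (narrow_weights : Bool), Dom_slice_lanes version ww aw accu_width narrow_weights → Pre_slice_lanes version ww aw accu_width narrow_weights → Spec_slice_lanes version ww aw accu_width narrow_weights (slice_lanes version ww aw accu_width narrow_weights)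

-- ===== LEMMAS AND PROOFS =====

-- A's per-step ceiling division, in closed form: the step at position i hands out
-- base = S/(n-1) plus one extra bit iff i ≤ S%(n-1).
lemma extra_eq (S n i : Int) (hn : 2 ≤ n) (h1 : 1 ≤ i) (h2 : i ≤ n - 1) :
    PySem.Int.floordiv ((S - ((i-1) * (S / (n-1)) + min (i-1) (S % (n-1)))) + (n - 1 - i)) (n - i)
      = S / (n-1) + (if i ≤ S % (n-1) then 1 else 0) := by
  have hk : (0:Int) < n - 1 := by omega
  have hm : (0:Int) < n - i := by omega
  rw [PySem.Int.floordiv_eq_ediv_of_pos hm]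
  have hSdecomp : (n-1) * (S / (n-1)) + S % (n-1) = S := Int.mul_ediv_add_emod S (n-1)
  have hrem0 : 0 ≤ S % (n-1) := Int.emod_nonneg S (by omega)
  have hremlt : S % (n-1) < n - 1 := Int.emod_lt_of_pos S hk
  rcases le_or_gt i (S % (n-1)) with hle | hlt
  · have hmin : min (i-1) (S % (n-1)) = i - 1 := by omega
    have hnum : S - ((i-1) * (S / (n-1)) + min (i-1) (S % (n-1))) + (n - 1 - i)
        = (S % (n-1) - i) + (S / (n-1) + 1) * (n - i) := by
      rw [hmin]; linear_combination -hSdecomp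
    rw [hnum, Int.add_mul_ediv_right _ _ (by omega : n - i ≠ 0),
        Int.ediv_eq_zero_of_lt (by omega) (by omega)]
    simp [hle]
  · have hmin : min (i-1) (S % (n-1)) = S % (n-1) := by omega
    have hnum : S - ((i-1) * (S / (n-1)) + min (i-1) (S % (n-1))) + (n - 1 - i)
        = (n - i - 1) + (S / (n-1)) * (n - i) := by
      rw [hmin]; linear_combination -hSdecomp
    rw [hnum, Int.add_mul_ediv_right _ _ (by omega : n - i ≠ 0),
        Int.ediv_eq_zero_of_lt (by omega) (by omega)]
    have : ¬ i ≤ S % (n-1) := by omega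
    simp [this]

-- Invariant of A's loop: after the steps i = 1 .. t the offsets list holds the
-- closed-form lane starts up to index t and the slack already handed out.
lemma laneLoop_inv (mlw S n : Int) (hn : 2 ≤ n) (t : Nat) (ht : (t:Int) ≤ n - 1) :
    (PySem.List.pyRange 1 ((t:Int)+1) 1).foldl (laneStep mlw n) (List.replicate (n+1).toNat 0, S)
      = ((List.range (n+1).toNat).map
           (fun j : Nat => if (j:Int) ≤ (t:Int)
                           then (j:Int) * (mlw + S / (n-1)) + min (j:Int) (S % (n-1)) else 0),
         S - ((t:Int) * (S / (n-1)) + min (t:Int) (S % (n-1)))) := by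
  have hrem0 : 0 ≤ S % (n-1) := Int.emod_nonneg S (by omega)
  induction t with
  | zero =>
    rw [show ((0:Nat):Int) + 1 = 1 by norm_num, PySem.List.pyRange_one_eq_nil (by omega)]
    simp only [List.foldl_nil, Prod.mk.injEq]
    refine ⟨?_, ?_⟩
    · apply List.ext_getElem
      · simp
      · intro j hj hj'
        simp only [List.getElem_replicate, List.getElem_map, List.getElem_range]
        split
        · have hj0 : j = 0 := by omega
          subst hj0; simp [min_eq_left hrem0]
        · rfl
    · simp [min_eq_left hrem0]
  | succ t ih =>
    have ht' : (t:Int) ≤ n - 1 := by push_cast at ht ⊢; omega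
    have hsplit : PySem.List.pyRange 1 (((t+1:Nat):Int)+1) 1
        = PySem.List.pyRange 1 ((t:Int)+1) 1 ++ [(t:Int)+1] := by
      push_cast
      exact PySem.List.pyRange_one_succ_right (by omega)
    rw [hsplit, List.foldl_append, ih ht', List.foldl_cons, List.foldl_nil]
    unfold laneStep
    have hx := extra_eq S n ((t:Int)+1) hn (by omega) (by push_cast at ht; omega)
    have hx' : PySem.Int.floordiv
        (S - ((t:Int) * (S / (n-1)) + min (t:Int) (S % (n-1))) + (n - 1 - ((t:Int)+1)))
        (n - ((t:Int)+1)) = S / (n-1) + (if (t:Int)+1 ≤ S % (n-1) then 1 else 0) := by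
      have h1 : (t:Int) + 1 - 1 = (t:Int) := by ring
      rw [h1] at hx
      exact hx
    simp only [hx']
    have htn : t < (n+1).toNat := by omega
    have ht1n : t + 1 < (n+1).toNat := by push_cast at ht; omega
    have hget : PySem.List.pyGetD
        ((List.range (n+1).toNat).map
          (fun j : Nat => if (j:Int) ≤ (t:Int)
                          then (j:Int) * (mlw + S / (n-1)) + min (j:Int) (S % (n-1)) else 0))
        ((t:Int)+1-1) 0
        = (t:Int) * (mlw + S / (n-1)) + min (t:Int) (S % (n-1)) := by
      rw [show (t:Int)+1-1 = ((t:Nat):Int) by ring, PySem.List.pyGetD_natCast]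
      rw [List.getD_eq_getElem?_getD, List.getElem?_map, List.getElem?_range htn]
      simp
    rw [hget]
    simp only [Prod.mk.injEq]
    refine ⟨?_, ?_⟩
    · have h0 : (0:Int) ≤ (t:Int)+1 := by omega
      rw [PySem.List.pySetD_of_nonneg _ _ h0, show (((t:Int)+1)).toNat = t + 1 from by omega]
      apply List.ext_getElem
      · simp
      · intro j hj hj'
        simp only [List.length_set, List.length_map, List.length_range] at hj
        rw [List.getElem_set]
        simp only [List.getElem_map, List.getElem_range]
        by_cases hjt : t + 1 = j
        · subst hjt
          rw [if_pos rfl, if_pos (le_refl ((t+1:Nat):Int))]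
          push_cast
          split_ifs with hc1
          · rw [show min ((t:Int)+1) (S % (n-1)) = (t:Int)+1 from by omega,
                show min ((t:Int)) (S % (n-1)) = (t:Int) from by omega]
            ring
          · rw [show min ((t:Int)+1) (S % (n-1)) = min ((t:Int)) (S % (n-1)) from by omega]
            ring
        · rw [if_neg hjt]
          by_cases hjle : (j:Int) ≤ (t:Int)
          · rw [if_pos hjle, if_pos (show (j:Int) ≤ ((t+1:Nat):Int) from by push_cast; omega)]
          · rw [if_neg hjle, if_neg (show ¬ (j:Int) ≤ ((t+1:Nat):Int) from by push_cast; omega)]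
    · push_cast
      split_ifs with hc1
      · rw [show min ((t:Int)+1) (S % (n-1)) = (t:Int)+1 from by omega,
            show min ((t:Int)) (S % (n-1)) = (t:Int) from by omega]
        ring
      · rw [show min ((t:Int)+1) (S % (n-1)) = min ((t:Int)) (S % (n-1)) from by omega]
        ring

-- The whole tail of both ports after num_lanes (= n) and bit_slack (= S) are computed.
lemma tail_eq (mlw S accu p n : Int) (hn0 : 0 ≤ n) :
    ((n : Int), (if PySem.List.pyGetD (PySem.List.pySetD ((PySem.List.pyRange 1 n 1).foldl (laneStep mlw n) (List.replicate (n+1).toNat 0, S)).1 n (PySem.List.pyGetD ((PySem.List.pyRange 1 n 1).foldl (laneStep mlw n) (List.replicate (n+1).toNat 0, S)).1 (n-1) 0 + accu)) n 0 > p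
       then PySem.List.pySetD (PySem.List.pySetD ((PySem.List.pyRange 1 n 1).foldl (laneStep mlw n) (List.replicate (n+1).toNat 0, S)).1 n (PySem.List.pyGetD ((PySem.List.pyRange 1 n 1).foldl (laneStep mlw n) (List.replicate (n+1).toNat 0, S)).1 (n-1) 0 + accu)) n p
       else PySem.List.pySetD ((PySem.List.pyRange 1 n 1).foldl (laneStep mlw n) (List.replicate (n+1).toNat 0, S)).1 n (PySem.List.pyGetD ((PySem.List.pyRange 1 n 1).foldl (laneStep mlw n) (List.replicate (n+1).toNat 0, S)).1 (n-1) 0 + accu)))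
  = (if n > 1 then
      (n, (PySem.List.pyRange 0 n 1).map (fun i => i * (mlw + PySem.Int.floordiv S (n-1)) + min i (PySem.Int.mod S (n-1))) ++
          [min (PySem.List.pyGetD ((PySem.List.pyRange 0 n 1).map (fun i => i * (mlw + PySem.Int.floordiv S (n-1)) + min i (PySem.Int.mod S (n-1)))) (-1) 0 + accu) p])
    else (n, List.replicate n.toNat 0 ++ [min (0 + accu) p])) := by
  rcases lt_or_ge n 2 with hsm | h2
  · have hcase : n = 0 ∨ n = 1 := by omega
    rcases hcase with h | h <;> subst h
    · rw [if_neg (show ¬((0:Int) > 1) from by norm_num),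
         show PySem.List.pyRange 1 0 1 = ([]:List Int) from PySem.List.pyRange_one_eq_nil (by norm_num)]
      simp only [List.foldl_nil]
      rw [show List.replicate ((0:Int)+1).toNat (0:Int) = [0] from by decide]
      rw [show PySem.List.pyGetD [(0:Int)] ((0:Int)-1) 0 = 0 from by decide]
      have hset : ∀ (y x : Int), PySem.List.pySetD [y] 0 x = [x] := fun y x => by
        rw [PySem.List.pySetD_of_nonneg _ _ (le_refl 0)]; rfl
      rw [hset]
      rw [PySem.List.pyGetD_zero_cons]
      split_ifs with hcap
      · rw [hset, show min ((0:Int) + accu) p = p from by omega]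
        rfl
      · rw [show min ((0:Int) + accu) p = 0 + accu from by omega]
        rfl
    · rw [if_neg (show ¬((1:Int) > 1) from by norm_num),
         show PySem.List.pyRange 1 1 1 = ([]:List Int) from PySem.List.pyRange_one_eq_nil (by norm_num)]
      simp only [List.foldl_nil]
      rw [show List.replicate ((1:Int)+1).toNat (0:Int) = [0, 0] from by decide]
      rw [show PySem.List.pyGetD [(0:Int), 0] ((1:Int)-1) 0 = 0 from by decide]
      have hset : ∀ (y x : Int), PySem.List.pySetD [(0:Int), y] 1 x = [0, x] := fun y x => by
        rw [PySem.List.pySetD_of_nonneg _ _ (by norm_num : (0:Int) ≤ 1)]; rfl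
      rw [hset]
      have hg1 : ∀ x : Int, PySem.List.pyGetD [(0:Int), x] 1 0 = x := fun x => by
        rw [show (1:Int) = ((1:Nat):Int) from rfl, PySem.List.pyGetD_natCast]; rfl
      rw [hg1]
      split_ifs with hcap
      · rw [hset, show min ((0:Int) + accu) p = p from by omega]
        rfl
      · rw [show min ((0:Int) + accu) p = 0 + accu from by omega]
        rfl
  · rw [if_pos (show n > 1 from by omega)]
    have hk : (0:Int) < n - 1 := by omega
    have hrem0 : 0 ≤ S % (n-1) := Int.emod_nonneg S (by omega)
    have hc : (((n-1).toNat : Nat) : Int) = n - 1 := by omega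
    have hinv := laneLoop_inv mlw S n h2 (n-1).toNat (by omega)
    rw [show (((n-1).toNat : Nat) : Int) + 1 = n from by omega] at hinv
    rw [hc] at hinv
    rw [hinv]
    dsimp only
    have hN1 : (n-1).toNat < (n+1).toNat := by omega
    have hNn : (n+1).toNat = n.toNat + 1 := by omega
    have hlen : ((List.range (n+1).toNat).map
          (fun j : Nat => if (j:Int) ≤ n-1 then (j:Int) * (mlw + S / (n-1)) + min (j:Int) (S % (n-1)) else 0)).length
        = (n+1).toNat := by simp
    -- value of the closed-form list at index n-1
    have hget1 : PySem.List.pyGetD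
        ((List.range (n+1).toNat).map
          (fun j : Nat => if (j:Int) ≤ n-1 then (j:Int) * (mlw + S / (n-1)) + min (j:Int) (S % (n-1)) else 0))
        (n-1) 0
        = (n-1) * (mlw + S / (n-1)) + min (n-1) (S % (n-1)) := by
      rw [PySem.List.pyGetD_eq_getElem _ _ (by omega) (by rw [hlen]; exact_mod_cast by omega)]
      rw [List.getElem_map, List.getElem_range]
      rw [show ((n-1 : Int).toNat : Int) = n - 1 from by omega]
      rw [if_pos (le_refl _)]
    rw [hget1]
    have hsetn : ∀ (xs : List Int) (v : Int), PySem.List.pySetD xs n v = xs.set n.toNat v :=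
      fun xs v => PySem.List.pySetD_of_nonneg xs v hn0
    rw [hsetn]
    have hgetset : ∀ x : Int, PySem.List.pyGetD
        (((List.range (n+1).toNat).map
          (fun j : Nat => if (j:Int) ≤ n-1 then (j:Int) * (mlw + S / (n-1)) + min (j:Int) (S % (n-1)) else 0)).set n.toNat x)
        n 0 = x := by
      intro x
      rw [PySem.List.pyGetD_eq_getElem _ _ hn0 (by rw [List.length_set, hlen]; exact_mod_cast by omega)]
      exact List.getElem_set_self (by rw [List.length_set, hlen]; omega)
    rw [hgetset]
    -- B side: floor division by the positive n-1 is ediv/emod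
    rw [PySem.Int.floordiv_eq_ediv_of_pos hk, PySem.Int.mod_eq_emod_of_pos hk]
    rw [PySem.List.pyRange_one 0 n]
    simp only [List.map_map, zero_add, Int.sub_zero]
    have hlenB : ((List.range n.toNat).map
        ((fun i : Int => i * (mlw + S / (n-1)) + min i (S % (n-1))) ∘ (fun k : Nat => (k:Int)))).length = n.toNat := by
      simp
    have hgetB : PySem.List.pyGetD
        ((List.range n.toNat).map
          ((fun i : Int => i * (mlw + S / (n-1)) + min i (S % (n-1))) ∘ (fun k : Nat => (k:Int))))
        (-1) 0 = (n-1) * (mlw + S / (n-1)) + min (n-1) (S % (n-1)) := by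
      rw [PySem.List.pyGetD_neg_ofNat _ 1 0 (by norm_num) (by rw [hlenB]; omega)]
      rw [List.getElem_map, List.getElem_range]
      simp only [Function.comp]
      rw [hlenB, show ((n.toNat - 1 : Nat) : Int) = n - 1 from by omega]
    rw [hgetB]
    -- both lists, elementwise
    have hmain : ∀ x : Int,
        (((List.range (n+1).toNat).map
          (fun j : Nat => if (j:Int) ≤ n-1 then (j:Int) * (mlw + S / (n-1)) + min (j:Int) (S % (n-1)) else 0)).set n.toNat x)
        = (List.range n.toNat).map
            ((fun i : Int => i * (mlw + S / (n-1)) + min i (S % (n-1))) ∘ (fun k : Nat => (k:Int))) ++ [x] := by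
      intro x
      apply List.ext_getElem
      · simp; omega
      · intro j hj hj'
        rw [List.length_set, hlen] at hj
        by_cases hjn : j < n.toNat
        · rw [List.getElem_set, if_neg (by omega),
              List.getElem_append_left (by rw [hlenB]; omega),
              List.getElem_map, List.getElem_range]
          rw [if_pos (by omega : ((j:Nat):Int) ≤ n - 1)]
          simp [Function.comp]
        · have hjeq : j = n.toNat := by omega
          subst hjeq
          rw [List.getElem_set_self (by rw [List.length_set, hlen]; omega),
              List.getElem_append_right (by rw [hlenB])]
          simp [hlenB]
    set F := (n-1) * (mlw + S / (n-1)) + min (n-1) (S % (n-1)) with hF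
    split_ifs with hcap
    · rw [hsetn, show min (F + accu) p = p from by omega]
      rw [List.set_set, hmain]
    · rw [hmain, show min (F + accu) p = F + accu from by omega]

-- ===== VERDICT (by name: the statement is the Claim_ definition above) =====
theorem slice_lanes_spec : Claim_equal_slice_lanes := by
  intro version ww aw accu nw _ hpre
  unfold Spec_slice_lanes slice_lanes slice_lanes_alt
  unfold Pre_slice_lanes at hpre
  dsimp only at hpre ⊢
  by_cases hAw : 25 + 2 * (if version > 1 then (1:Int) else 0) = ww
  · simp only [if_pos hAw]
    exact tail_eq _ _ _ _ 1 (by norm_num)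
  · simp only [if_neg hAw] at hpre ⊢
    rcases hpre with h | ⟨hm0, hn0⟩
    · exact absurd h hAw
    exact tail_eq _ _ _ _ _ hn0
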